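-- pv_equiv track=rewrite | github.com/Dexterte/Atcoder | 192/abc_c.py | calc
-- ===== SOURCE A (Python) =====
-- import copy
--
-- def calc(s: int) -> int:
--     tmp = [i for i in str(s)]
--     tmp.sort()
--     g1 = copy.deepcopy(tmp)
--     tmp.reverse()
--     g2 = copy.deepcopy(tmp)
--     diff = int("".join(g2)) - int("".join(g1))
--     return diff
-- ===== SOURCE B (Python) =====
-- def calc(s: int) -> int:
--     cnt = {}
--     for ch in str(s):
--         cnt[ch] = cnt.get(ch, 0) + 1
--     order = "-0123456789"
--     asc = "".join(ch * cnt.get(ch, 0) for ch in order)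
--     desc = "".join(ch * cnt.get(ch, 0) for ch in reversed(order))
--     return int(desc) - int(asc)
-- ===== Notes on version B (the rewrite author's own statement) =====
-- stated objective: alternative
-- what changed: Replaces the comparison sort + deepcopy + in-place reverse with one counting pass over the characters of str(s) and a counting-sort rebuild of the ascending/descending strings from the fixed alphabet "-0123456789".
import Mathlib
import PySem

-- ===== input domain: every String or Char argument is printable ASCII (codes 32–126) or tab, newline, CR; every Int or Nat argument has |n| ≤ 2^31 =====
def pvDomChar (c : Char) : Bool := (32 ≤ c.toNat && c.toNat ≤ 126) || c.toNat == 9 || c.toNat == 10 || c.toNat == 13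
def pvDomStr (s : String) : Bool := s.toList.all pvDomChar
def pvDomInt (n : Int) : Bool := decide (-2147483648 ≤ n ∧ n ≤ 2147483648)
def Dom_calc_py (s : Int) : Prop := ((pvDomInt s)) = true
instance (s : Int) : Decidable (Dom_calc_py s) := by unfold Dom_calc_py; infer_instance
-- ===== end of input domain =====

-- B replaces A's comparison sort (sort + deepcopy + reverse) by a counting pass over the characters
-- and a rebuild of the ascending/descending strings from the fixed alphabet "-0123456789" (counting sort); objective: alternative.


-- ===== PORT A =====
def calc_py (s : Int) : Int :=
  let tmp : List Char := (PySem.Int.toStr s).toList       -- [i for i in str(s)]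
  let tmp := PySem.List.sorted tmp (fun x => x) false     -- tmp.sort()
  let g1 := tmp                                           -- g1 = copy.deepcopy(tmp)
  let tmp := tmp.reverse                                  -- tmp.reverse()
  let g2 := tmp                                           -- g2 = copy.deepcopy(tmp)
  match PySem.Int.ofChars? g2, PySem.Int.ofChars? g1 with -- int("".join(g2)) - int("".join(g1))
  | some a, some b => a - b
  | _, _ => 0                                             -- unreachable under Pre_ (int() raises ValueError)

-- ===== PORT B =====
def calc_py_alt (s : Int) : Int :=
  let cnt : PySem.Dict Char Int :=
    (PySem.Int.toStr s).toList.foldl (fun d ch => d.insert ch (d.getD ch 0 + 1)) PySem.Dict.empty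
  let order : List Char := "-0123456789".toList
  let asc : List Char := (order.map (fun ch => PySem.List.pyRepeat [ch] (cnt.getD ch 0))).flatten
  let desc : List Char := (order.reverse.map (fun ch => PySem.List.pyRepeat [ch] (cnt.getD ch 0))).flatten
  ((PySem.Int.ofChars? desc).bind fun a =>
    (PySem.Int.ofChars? asc).map fun b => a - b).getD 0   -- int(desc) - int(asc); none unreachable under Pre_

-- ===== PRECONDITION & SPEC =====
-- Pre_ excludes the negative inputs: there both A and B raise ValueError (int() on "digits-").
def Pre_calc_py (s : Int) : Prop := 0 ≤ s
instance (s : Int) : Decidable (Pre_calc_py s) := by unfold Pre_calc_py; infer_instance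
def pvWitness_calc_py : Int := 2020
def Spec_calc_py (s : Int) (out : Int) : Prop := out = calc_py_alt s
instance (s : Int) (out : Int) : Decidable (Spec_calc_py s out) := by unfold Spec_calc_py; infer_instance

-- ===== CLAIM (what is proved, stated in full; the proofs are below) =====
def Claim_equal_calc_py : Prop := ∀ (s : Int), Dom_calc_py s → Pre_calc_py s → Spec_calc_py s (calc_py s)

-- ===== LEMMAS AND PROOFS =====

-- every character digitChar produces for a remainder below 10 lies in the fixed alphabet
lemma digitChar_mem_order : ∀ m : Nat, m < 10 → Nat.digitChar m ∈ "-0123456789".toList := by decide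

lemma toDigits_mem_order (n : Nat) : ∀ c ∈ Nat.toDigits 10 n, c ∈ "-0123456789".toList := by
  induction n using Nat.strong_induction_on with
  | _ n ih =>
    intro c hc
    rw [Nat.toDigits_eq_if (by norm_num)] at hc
    by_cases h : n < 10
    · simp only [if_pos h, List.mem_singleton] at hc
      exact hc ▸ digitChar_mem_order n h
    · simp only [if_neg h, List.mem_append, List.mem_singleton] at hc
      rcases hc with hc | hc
      · exact ih (n / 10) (Nat.div_lt_self (by omega) (by norm_num)) c hc
      · exact hc ▸ digitChar_mem_order (n % 10) (Nat.mod_lt _ (by norm_num))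

lemma toChars_mem_order (s : Int) : ∀ c ∈ PySem.Int.toChars s, c ∈ "-0123456789".toList := by
  intro c hc
  by_cases hs : s < 0
  · rw [show PySem.Int.toChars s = '-' :: Nat.toDigits 10 s.natAbs from by
      unfold PySem.Int.toChars; rw [if_pos hs]] at hc
    rcases List.mem_cons.mp hc with hc | hc
    · exact hc ▸ (by decide)
    · exact toDigits_mem_order _ c hc
  · rw [show PySem.Int.toChars s = Nat.toDigits 10 s.toNat from by
      unfold PySem.Int.toChars; rw [if_neg hs]] at hc
    exact toDigits_mem_order _ c hc

-- count of a character in the counting-sort rebuild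
lemma count_flat (g : Char → Nat) (a : Char) (os : List Char) (hnd : os.Nodup) :
    (os.flatMap (fun c => List.replicate (g c) c)).count a = if a ∈ os then g a else 0 := by
  induction os with
  | nil => simp
  | cons c t ih =>
    rcases List.nodup_cons.mp hnd with ⟨hct, hnd'⟩
    simp only [List.flatMap_cons, List.count_append, List.count_replicate, ih hnd',
      List.mem_cons]
    by_cases hac : a = c
    · subst hac
      simp [hct]
    · simp [hac, Ne.symm hac]

-- the counting-sort rebuild is sorted (non-strictly) when the alphabet is strictly increasing
lemma pairwise_flat (g : Char → Nat) (os : List Char) (hpw : os.Pairwise (· < ·)) :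
    (os.flatMap (fun c => List.replicate (g c) c)).Pairwise (· ≤ ·) := by
  induction os with
  | nil => simp
  | cons c t ih =>
    simp only [List.flatMap_cons]
    rw [List.pairwise_append]
    refine ⟨List.pairwise_replicate.mpr (Or.inr (le_refl c)), ih hpw.tail, ?_⟩
    intro x hx y hy
    have hxc : x = c := List.eq_of_mem_replicate hx
    obtain ⟨d, hd, hyd⟩ := List.mem_flatMap.mp hy
    have hyc : y = d := List.eq_of_mem_replicate hyd
    rw [hxc, hyc]
    exact le_of_lt ((List.pairwise_cons.mp hpw).1 d hd)

-- the counting-sort rebuild IS sorted(L)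
lemma flat_eq_sorted (Lc os : List Char) (hpw : os.Pairwise (· < ·))
    (hmem : ∀ c ∈ Lc, c ∈ os) :
    PySem.List.sorted Lc (fun x => x) false = os.flatMap (fun c => List.replicate (Lc.count c) c) := by
  have hnd : os.Nodup := hpw.nodup
  apply PySem.List.sorted_id_eq_of_perm_of_pairwise
  · apply List.perm_iff_count.mpr
    intro a
    rw [count_flat _ a os hnd]
    by_cases ha : a ∈ os
    · simp [ha]
    · simp only [if_neg ha]
      exact (List.count_eq_zero.mpr (fun h => ha (hmem a h))).symm
  · exact pairwise_flat _ os hpw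

-- ===== VERDICT (by name: the statement is the Claim_ definition above) =====
theorem calc_py_spec : Claim_equal_calc_py := by
  intro s _ _
  show calc_py s = calc_py_alt s
  simp only [calc_py, calc_py_alt]
  set L : List Char := (PySem.Int.toStr s).toList with hL
  set order : List Char := "-0123456789".toList with horder
  have hcnt : (fun ch => PySem.List.pyRepeat [ch]
        ((L.foldl (fun d x => d.insert x (d.getD x 0 + 1)) PySem.Dict.empty).getD ch 0))
      = fun ch => List.replicate (L.count ch) ch := by
    funext ch
    rw [PySem.Dict.getD_foldl_insert_add_one, PySem.List.pyRepeat_singleton]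
    simp [PySem.Dict.getD_empty]
  have hmem : ∀ c ∈ L, c ∈ order := by
    rw [hL, PySem.Int.toList_toStr]
    exact toChars_mem_order s
  have hsorted : PySem.List.sorted L (fun x => x) false
      = order.flatMap (fun c => List.replicate (L.count c) c) :=
    flat_eq_sorted L order (by rw [horder]; decide) hmem
  have hasc : (order.map (fun ch => PySem.List.pyRepeat [ch]
        ((L.foldl (fun d x => d.insert x (d.getD x 0 + 1)) PySem.Dict.empty).getD ch 0))).flatten
      = PySem.List.sorted L (fun x => x) false := by
    rw [hcnt, hsorted, List.flatMap_def]
  have hdesc : (order.reverse.map (fun ch => PySem.List.pyRepeat [ch]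
        ((L.foldl (fun d x => d.insert x (d.getD x 0 + 1)) PySem.Dict.empty).getD ch 0))).flatten
      = (PySem.List.sorted L (fun x => x) false).reverse := by
    rw [hcnt, hsorted, ← List.flatMap_def, List.reverse_flatMap]
    congr 1
    funext c
    simp [Function.comp, List.reverse_replicate]
  rw [hasc, hdesc]
  cases PySem.Int.ofChars? ((PySem.List.sorted L (fun x => x) false).reverse) <;>
    cases PySem.Int.ofChars? (PySem.List.sorted L (fun x => x) false) <;> rfl
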